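-- pv_equiv track=rewrite | github.com/pypi-data/pypi-mirror-83 | packages/findcrashedcodedeveloper/findcrashedcodedeveloper-0.1.0.tar.gz/findcrashedcodedeveloper-0.1.0/findcrashedcodedeveloper/utilities/filepath.py | get_all_possible_repository_paths
-- ===== SOURCE A (Python) =====
-- def _sanitize_repository_path(path):
--     if path and path[0] == '/':
--         path = str(path[1:])
--     return path
--
-- def get_all_possible_repository_paths(absolute_filepath, repository_name):
--     """Get possible repository paths of this file in repository_name
--
--     absolute_filepath : str
--         absolute path of crashed file
--     repository_name : str
--         name of repository for which this file may belong
--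
--     Returns
--     -------
--     list of str
--         all possible repository path of file in this repository
--     """
--     separator = repository_name + '/'
--     path_parts = absolute_filepath.split(separator)
--
--     if len(path_parts) <= 1:
--         return []
--
--     result = []
--     for i in range(1, len(path_parts)):
--         possible_repository_path = separator.join(path_parts[i:])
--         possible_repository_path = _sanitize_repository_path(
--             possible_repository_path
--         )
--         result.append(possible_repository_path)
--
--     return result
-- ===== SOURCE B (Python) =====
-- def get_all_possible_repository_paths(absolute_filepath, repository_name):
--     """Same result as A, built in ONE reverse pass: instead of re-joining
--     path_parts[i:] for every i, accumulate the suffix string right-to-left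
--     and collect the outputs back-to-front."""
--     separator = repository_name + '/'
--     parts = absolute_filepath.split(separator)
--     result = []
--     acc = None
--     for part in reversed(parts[1:]):
--         acc = part if acc is None else part + separator + acc
--         result.append(acc[1:] if acc.startswith('/') else acc)
--     result.reverse()
--     return result
-- ===== Notes on version B (the rewrite author's own statement) =====
-- stated objective: alternative
-- what changed: Instead of re-joining path_parts[i:] with the separator for every index i, B makes a single reverse pass over parts[1:], accumulating the suffix string incrementally and collecting the sanitized outputs back-to-front, then reverses the result list.
import Mathlib
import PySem

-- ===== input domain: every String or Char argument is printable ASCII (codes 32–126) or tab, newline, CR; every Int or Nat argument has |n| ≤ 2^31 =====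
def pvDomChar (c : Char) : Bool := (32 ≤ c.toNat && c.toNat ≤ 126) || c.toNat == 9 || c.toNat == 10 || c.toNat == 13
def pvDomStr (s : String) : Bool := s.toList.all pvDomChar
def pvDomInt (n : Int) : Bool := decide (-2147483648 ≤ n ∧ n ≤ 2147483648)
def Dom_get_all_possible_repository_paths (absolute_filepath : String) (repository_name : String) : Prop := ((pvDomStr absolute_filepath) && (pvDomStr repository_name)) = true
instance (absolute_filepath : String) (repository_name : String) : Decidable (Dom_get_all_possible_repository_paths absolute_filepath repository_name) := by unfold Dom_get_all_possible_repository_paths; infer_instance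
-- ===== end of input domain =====

-- B replaces A's per-index re-join of path_parts[i:] by a single reverse pass that
-- accumulates the suffix string and collects the outputs back-to-front (objective: alternative).

-- ===== PORT A =====
-- helper _sanitize_repository_path, literal: 'if path and path[0] == '/': path = str(path[1:])'
def pvSanitize (path : List Char) : List Char :=
  if path ≠ [] ∧ PySem.Chars.pyGet? path 0 = some '/' then
    PySem.Chars.slice path (some 1) none
  else path

def get_all_possible_repository_paths (absolute_filepath : String) (repository_name : String) : List String :=
  let separator := repository_name.toList ++ ['/']
  -- separator ends in '/' hence is nonempty, so split? never returns none; getD [] is unreachable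
  let path_parts := (PySem.Chars.split? absolute_filepath.toList separator).getD []
  if path_parts.length ≤ 1 then []
  else
    (PySem.List.pyRange 1 (path_parts.length : Int) 1).foldl
      (fun result i =>
        result ++ [String.ofList (pvSanitize
          (PySem.Chars.join separator (PySem.List.slice path_parts (some i) none)))])
      []

-- ===== PORT B =====
-- 'acc[1:] if acc.startswith('/') else acc', literal
def pvOut (acc : List Char) : String :=
  String.ofList (if PySem.Chars.startswith acc ['/'] then PySem.Chars.slice acc (some 1) none else acc)

-- loop body: state = (acc : Optional str, result list)
def pvStep (separator : List Char) (st : Option (List Char) × List String) (part : List Char) :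
    Option (List Char) × List String :=
  let acc := match st.1 with | none => part | some a => part ++ separator ++ a
  (some acc, st.2 ++ [pvOut acc])

def get_all_possible_repository_paths_alt (absolute_filepath : String) (repository_name : String) : List String :=
  let separator := repository_name.toList ++ ['/']
  let parts := (PySem.Chars.split? absolute_filepath.toList separator).getD []
  ((PySem.List.slice parts (some 1) none).reverse.foldl (pvStep separator) (none, [])).2.reverse

-- ===== PRECONDITION & SPEC =====
def Spec_get_all_possible_repository_paths (absolute_filepath : String) (repository_name : String) (out : List String) : Prop := out = get_all_possible_repository_paths_alt absolute_filepath repository_name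
instance (absolute_filepath : String) (repository_name : String) (out : List String) : Decidable (Spec_get_all_possible_repository_paths absolute_filepath repository_name out) := by unfold Spec_get_all_possible_repository_paths; infer_instance

-- ===== CLAIM (what is proved, stated in full; the proofs are below) =====
def Claim_equal_get_all_possible_repository_paths : Prop := ∀ (absolute_filepath : String) (repository_name : String), Dom_get_all_possible_repository_paths absolute_filepath repository_name → Spec_get_all_possible_repository_paths absolute_filepath repository_name (get_all_possible_repository_paths absolute_filepath repository_name)

-- ===== LEMMAS AND PROOFS =====

-- A's sanitizer and B's inline strip of one leading '/' produce the same string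
lemma pvSanitize_eq_pvOut (x : List Char) : String.ofList (pvSanitize x) = pvOut x := by
  cases x with
  | nil => simp [pvSanitize, pvOut, PySem.Chars.startswith]
  | cons c cs =>
    have hsw : PySem.Chars.startswith (c :: cs) ['/'] = true ↔ c = '/' := by
      rw [PySem.Chars.startswith_iff]
      constructor
      · rintro ⟨t, ht⟩; cases ht; rfl
      · rintro rfl; exact ⟨cs, rfl⟩
    by_cases h : c = '/'
    · subst h
      simp [pvSanitize, pvOut, hsw, PySem.Chars.pyGet?]
    · have : PySem.Chars.startswith (c :: cs) ['/'] = false := by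
        rcases Bool.eq_false_or_eq_true (PySem.Chars.startswith (c :: cs) ['/']) with hb | hb
        · exact absurd (hsw.mp hb) h
        · exact hb
      simp [pvSanitize, pvOut, this, h, PySem.Chars.pyGet?]

-- invariant of B's reverse loop: after consuming t (right-to-left), acc = join(t) and
-- the outputs collected so far, read in reverse, are the sanitized joins of the suffixes of t
lemma pvLoop (sep : List Char) (t : List (List Char)) (h : t ≠ []) :
    (t.reverse.foldl (pvStep sep) (none, [])).1 = some (PySem.Chars.join sep t) ∧
    (t.reverse.foldl (pvStep sep) (none, [])).2.reverse =
      (List.range t.length).map (fun k => pvOut (PySem.Chars.join sep (t.drop k))) := by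
  induction t with
  | nil => exact absurd rfl h
  | cons x t' ih =>
    cases t' with
    | nil =>
      refine ⟨by simp [pvStep, PySem.Chars.join_singleton], ?_⟩
      simp [pvStep, PySem.Chars.join_singleton]
    | cons y r =>
      obtain ⟨h1, h2⟩ := ih (by simp)
      have hjoin : PySem.Chars.join sep (x :: y :: r) = x ++ sep ++ PySem.Chars.join sep (y :: r) :=
        PySem.Chars.join_cons_cons sep x y r
      rw [List.reverse_cons, List.foldl_append]
      simp only [List.foldl_cons, List.foldl_nil, pvStep, h1]
      constructor
      · rw [hjoin]
      · rw [List.reverse_append, h2]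
        simp only [List.reverse_singleton, List.singleton_append, List.length_cons]
        rw [List.range_succ_eq_map, List.range_succ_eq_map]
        simp only [List.map_cons, List.map_map, List.drop_zero, hjoin]
        have hfs : ((fun k => pvOut (PySem.Chars.join sep (List.drop k (x :: y :: r)))) ∘ Nat.succ)
            = fun k => pvOut (PySem.Chars.join sep (List.drop k (y :: r))) := by
          funext k; simp [Function.comp]
        rw [hfs, List.range_succ_eq_map]
        simp

theorem pv_main (separator : List Char) (parts : List (List Char)) :
    (if parts.length ≤ 1 then ([] : List String)
     else
       (PySem.List.pyRange 1 (parts.length : Int) 1).foldl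
         (fun result i =>
           result ++ [String.ofList (pvSanitize
             (PySem.Chars.join separator (PySem.List.slice parts (some i) none)))])
         []) =
    ((PySem.List.slice parts (some 1) none).reverse.foldl (pvStep separator) (none, [])).2.reverse := by
  rw [PySem.List.slice_from_one]
  by_cases hle : parts.length ≤ 1
  · have : parts.tail = [] := by
      cases parts with
      | nil => rfl
      | cons a l => cases l with
        | nil => rfl
        | cons b m => simp at hle
    simp [hle, this]
  · have hlen : 2 ≤ parts.length := by omega
    have ht : parts.tail ≠ [] := by
      cases parts with
      | nil => simp at hlen
      | cons a l => cases l with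
        | nil => simp at hlen
        | cons b m => simp
    rw [if_neg hle, (pvLoop separator parts.tail ht).2]
    rw [PySem.List.foldl_append_singleton_eq_map, PySem.List.pyRange_one]
    have hcast : ((parts.length : Int) - 1).toNat = parts.tail.length := by
      simp [List.length_tail]
    rw [hcast, List.map_map]
    apply List.map_congr_left
    intro k hk
    simp only [Function.comp]
    have hslice : PySem.List.slice parts (some ((1 : Int) + (k : Nat))) none = parts.tail.drop k := by
      have : ((1 : Int) + (k : Nat)) = (((1 + k : Nat)) : Int) := by push_cast; ring
      rw [this, PySem.List.slice_from_natCast, ← List.drop_one, List.drop_drop]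
    rw [hslice, pvSanitize_eq_pvOut]

-- ===== VERDICT (by name: the statement is the Claim_ definition above) =====
theorem get_all_possible_repository_paths_spec : Claim_equal_get_all_possible_repository_paths := by
  intro af rn _
  unfold Spec_get_all_possible_repository_paths
  unfold get_all_possible_repository_paths get_all_possible_repository_paths_alt
  exact pv_main _ _
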